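-- pv_equiv track=rewrite | github.com/arealjones/Personal | Fall 2019/Lab7/encrypt.py | slide_down
-- ===== SOURCE A (Python) =====
-- def slide_down(word, t):
--     new_str = ""
--     for i in range(len(word)):
--         if i == 0:
--             new_str += word[1]
--         elif i == (len(word)-1):
--             new_str += word[0]
--         else:
--             new_str += word[1 + t]
--     return new_str
-- ===== SOURCE B (Python) =====
-- def slide_down(word, t):
--     if not word:
--         return ""
--     mid = word[1 + t] * (len(word) - 2) if len(word) > 2 else ""
--     return word[1] + mid + word[0]
-- ===== Notes on version B (the rewrite author's own statement) =====
-- stated objective: simpler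
-- what changed: Replaced the per-index loop over range(len(word)) (repeated string concatenation) with a closed-form construction word[1] + word[1+t]*(len(word)-2) + word[0].
import Mathlib
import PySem

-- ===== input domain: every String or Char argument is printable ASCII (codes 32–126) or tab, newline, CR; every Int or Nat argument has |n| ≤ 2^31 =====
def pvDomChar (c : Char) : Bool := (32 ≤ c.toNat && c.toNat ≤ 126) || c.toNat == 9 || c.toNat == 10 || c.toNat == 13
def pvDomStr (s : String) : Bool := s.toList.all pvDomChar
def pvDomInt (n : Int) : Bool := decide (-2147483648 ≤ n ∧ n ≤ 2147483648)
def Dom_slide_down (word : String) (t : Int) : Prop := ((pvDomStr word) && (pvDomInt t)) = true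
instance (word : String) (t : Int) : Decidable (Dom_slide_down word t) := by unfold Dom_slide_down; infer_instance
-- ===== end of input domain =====

-- B replaces A's per-index loop by a closed-form construction: first char swapped in, a
-- replicated middle character, then the swapped last char (objective: simpler).

-- ===== PORT A =====
-- literal port of A: loop over range(len(word)), appending one character per index
def slide_down (word : String) (t : Int) : String :=
  let cs := word.toList
  let res := (PySem.List.pyRange 0 (cs.length : Int) 1).foldl (fun acc i =>
    if i = 0 then acc ++ [PySem.List.pyGetD cs 1 ' ']
    else if i = (cs.length : Int) - 1 then acc ++ [PySem.List.pyGetD cs 0 ' ']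
    else acc ++ [PySem.List.pyGetD cs (1 + t) ' ']) []
  String.ofList res

-- ===== PORT B =====
-- literal port of B: closed form word[1] + word[1+t]*(len-2) + word[0] with guards
def slide_down_alt (word : String) (t : Int) : String :=
  let cs := word.toList
  if cs = [] then "" else
  let mid := if cs.length > 2 then List.replicate (cs.length - 2) (PySem.List.pyGetD cs (1 + t) ' ') else []
  String.ofList ([PySem.List.pyGetD cs 1 ' '] ++ mid ++ [PySem.List.pyGetD cs 0 ' '])

-- ===== PRECONDITION & SPEC =====
-- Pre_ excludes exactly the inputs where the Python A raises IndexError: length-1 words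
-- (word[1] is out of range) and words of length ≥ 3 where 1+t is not a valid index.
def Pre_slide_down (word : String) (t : Int) : Prop :=
  word.toList.length ≠ 1 ∧
  (word.toList.length ≤ 2 ∨ PySem.Raise.InRange word.toList.length (1 + t))
instance (word : String) (t : Int) : Decidable (Pre_slide_down word t) := by
  unfold Pre_slide_down; infer_instance
def pvWitness_slide_down : String × Int := ("abc", 0)

def Spec_slide_down (word : String) (t : Int) (out : String) : Prop := out = slide_down_alt word t
instance (word : String) (t : Int) (out : String) : Decidable (Spec_slide_down word t out) := by unfold Spec_slide_down; infer_instance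

-- ===== CLAIM (what is proved, stated in full; the proofs are below) =====
def Claim_equal_slide_down : Prop := ∀ (word : String) (t : Int), Dom_slide_down word t → Pre_slide_down word t → Spec_slide_down word t (slide_down word t)

-- ===== LEMMAS AND PROOFS =====

-- ===== VERDICT (by name: the statement is the Claim_ definition above) =====
theorem slide_down_spec : Claim_equal_slide_down := by
  intro word t _ hpre
  obtain ⟨h1, _⟩ := hpre
  unfold Spec_slide_down slide_down slide_down_alt
  simp only
  by_cases hnil : word.toList = []
  · rw [hnil]
    simp [PySem.List.pyRange_one_eq_nil]
  · have h0 : word.toList.length ≠ 0 := by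
      simpa [List.length_eq_zero_iff] using hnil
    have hlen : 2 ≤ word.toList.length := by omega
    rw [if_neg hnil]
    set cs := word.toList with hcs
    set c1 := PySem.List.pyGetD cs 1 ' ' with hc1
    set c0 := PySem.List.pyGetD cs 0 ' ' with hc0
    set cm := PySem.List.pyGetD cs (1 + t) ' ' with hcm
    have hF : (fun (acc : List Char) (i : Int) =>
        if i = 0 then acc ++ [c1]
        else if i = (cs.length : Int) - 1 then acc ++ [c0]
        else acc ++ [cm])
      = fun acc i => acc ++ [if i = 0 then c1 else if i = (cs.length : Int) - 1 then c0 else cm] := by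
      funext acc i; split_ifs <;> rfl
    rw [hF, PySem.List.foldl_append_singleton_eq_map]
    have p1 : PySem.List.pyRange 0 1 1 = [0] := by
      simpa using PySem.List.pyRange_one_singleton 0
    have p2 : PySem.List.pyRange ((cs.length : Int) - 1) (cs.length : Int) 1
        = [(cs.length : Int) - 1] := by
      have e2 : (cs.length : Int) - 1 + 1 = (cs.length : Int) := by omega
      have := PySem.List.pyRange_one_singleton ((cs.length : Int) - 1)
      rwa [e2] at this
    have hsplit : PySem.List.pyRange 0 (cs.length : Int) 1
        = [0] ++ PySem.List.pyRange 1 ((cs.length : Int) - 1) 1 ++ [(cs.length : Int) - 1] := by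
      rw [PySem.List.pyRange_one_append 0 1 (cs.length : Int) (by omega) (by omega),
          PySem.List.pyRange_one_append 1 ((cs.length : Int) - 1) (cs.length : Int) (by omega) (by omega),
          p1, p2, List.append_assoc]
    rw [hsplit]
    have hmid : (PySem.List.pyRange 1 ((cs.length : Int) - 1) 1).map
        (fun i => if i = 0 then c1 else if i = (cs.length : Int) - 1 then c0 else cm)
        = List.replicate (cs.length - 2) cm := by
      rw [List.eq_replicate_iff]
      constructor
      · rw [List.length_map, PySem.List.length_pyRange_one]; omega
      · intro b hb
        rw [List.mem_map] at hb
        obtain ⟨i, hi, rfl⟩ := hb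
        rw [PySem.List.mem_pyRange_one] at hi
        rw [if_neg (by omega), if_neg (by omega)]
    have hne : ¬(((cs.length : Int) - 1) = 0) := by omega
    by_cases hgt : cs.length > 2
    · simp [hmid, hne, hgt]
    · have hz : cs.length - 2 = 0 := by omega
      simp [hmid, hne, hgt, hz]
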